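-- pv_equiv track=rewrite | github.com/bgreni/EmberRegex | bench/gen_pdf.py | assign_sections
-- ===== SOURCE A (Python) =====
-- SECTIONS = [
--     ("Throughput scaling", ["throughput_"]),
--     ("Anchors", ["anchor_"]),
--     ("Multiline / DOTALL", ["multiline_", "dotall_"]),
--     ("Named groups", ["named_group_", "positional_group_"]),
--     ("Negative lookaround", ["neg_look", "password_"]),
--     ("Alternation", ["alternation_"]),
--     ("Findall", ["findall_"]),
--     ("Replace", ["replace_"]),
--     ("Split", ["split_"]),
--     ("Pathological patterns", ["pathological_"]),
--     ("Real-world patterns", ["realworld_"]),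
--     ("Inline flags", ["inline_"]),
--     ("Engine comparison", ["engine_"]),
--     ("Compilation", ["compile_"]),
-- ]
--
-- def assign_sections(names: list[str]) -> dict[str, str]:
--     """Map each benchmark name to its section title."""
--     assignment = {}
--     for name in names:
--         for title, prefixes in SECTIONS:
--             if any(name.startswith(p) for p in prefixes):
--                 assignment[name] = title
--                 break
--         else:
--             assignment[name] = "Other"
--     return assignment
-- ===== SOURCE B (Python) =====
-- SECTIONS = [
--     ("Throughput scaling", ["throughput_"]),
--     ("Anchors", ["anchor_"]),
--     ("Multiline / DOTALL", ["multiline_", "dotall_"]),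
--     ("Named groups", ["named_group_", "positional_group_"]),
--     ("Negative lookaround", ["neg_look", "password_"]),
--     ("Alternation", ["alternation_"]),
--     ("Findall", ["findall_"]),
--     ("Replace", ["replace_"]),
--     ("Split", ["split_"]),
--     ("Pathological patterns", ["pathological_"]),
--     ("Real-world patterns", ["realworld_"]),
--     ("Inline flags", ["inline_"]),
--     ("Engine comparison", ["engine_"]),
--     ("Compilation", ["compile_"]),
-- ]
--
-- def assign_sections(names: list[str]) -> dict[str, str]:
--     """Map each benchmark name to its section title (section-major loop)."""
--     # Seed every name with the default; then sweep SECTIONS from last to first,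
--     # overwriting on match, so the first matching section in SECTIONS order wins.
--     assignment = {name: "Other" for name in names}
--     for title, prefixes in reversed(SECTIONS):
--         for name in assignment:
--             if any(name.startswith(p) for p in prefixes):
--                 assignment[name] = title
--     return assignment
-- ===== Notes on version B (the rewrite author's own statement) =====
-- stated objective: alternative
-- what changed: B is section-major instead of name-major: it seeds every name with "Other" and then sweeps SECTIONS in reverse order, overwriting on prefix match, so the first matching section in SECTIONS order wins without any per-name break/else logic.
import Mathlib
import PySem

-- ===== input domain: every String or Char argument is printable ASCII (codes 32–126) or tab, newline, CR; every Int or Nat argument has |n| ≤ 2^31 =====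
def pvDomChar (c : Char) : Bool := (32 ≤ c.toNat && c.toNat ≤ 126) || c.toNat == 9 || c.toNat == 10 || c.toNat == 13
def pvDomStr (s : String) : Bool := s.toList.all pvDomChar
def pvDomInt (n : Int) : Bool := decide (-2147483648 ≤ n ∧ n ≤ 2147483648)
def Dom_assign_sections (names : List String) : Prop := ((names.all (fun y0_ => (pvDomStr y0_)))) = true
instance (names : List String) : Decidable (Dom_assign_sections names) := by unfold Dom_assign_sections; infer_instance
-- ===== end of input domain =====

-- B re-implements the name-major first-match loop as a section-major reverse sweep over
-- SECTIONS (alternative decomposition, same cost); return values proved equal on all inputs.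

-- ===== PORT A =====
def pvSECTIONS : List (String × List String) := [
  ("Throughput scaling", ["throughput_"]),
  ("Anchors", ["anchor_"]),
  ("Multiline / DOTALL", ["multiline_", "dotall_"]),
  ("Named groups", ["named_group_", "positional_group_"]),
  ("Negative lookaround", ["neg_look", "password_"]),
  ("Alternation", ["alternation_"]),
  ("Findall", ["findall_"]),
  ("Replace", ["replace_"]),
  ("Split", ["split_"]),
  ("Pathological patterns", ["pathological_"]),
  ("Real-world patterns", ["realworld_"]),
  ("Inline flags", ["inline_"]),
  ("Engine comparison", ["engine_"]),
  ("Compilation", ["compile_"])]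

-- inner 'for title, prefixes in SECTIONS: … break / else:' — first match wins, else "Other"
def pvFirstSection (secs : List (String × List String)) (name : String) : String :=
  match secs with
  | [] => "Other"
  | (title, prefixes) :: rest =>
      if prefixes.any (fun p => PySem.Str.startswith name p) then title
      else pvFirstSection rest name

def assign_sections (names : List String) : List (String × String) :=
  (names.foldl (fun assignment name =>
      assignment.insert name (pvFirstSection pvSECTIONS name))
    (PySem.Dict.empty : PySem.Dict String String)).items

-- ===== PORT B =====
def assign_sections_alt (names : List String) : List (String × String) :=
  let seeded : PySem.Dict String String :=
    names.foldl (fun assignment name => assignment.insert name "Other") PySem.Dict.empty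
  (pvSECTIONS.reverse.foldl (fun assignment tp =>
      assignment.keys.foldl (fun d name =>
        if tp.2.any (fun p => PySem.Str.startswith name p) then d.insert name tp.1 else d)
        assignment)
    seeded).items

-- ===== PRECONDITION & SPEC =====
def Spec_assign_sections (names : List String) (out : List (String × String)) : Prop := out = assign_sections_alt names
instance (names : List String) (out : List (String × String)) : Decidable (Spec_assign_sections names out) := by unfold Spec_assign_sections; infer_instance

-- ===== CLAIM (what is proved, stated in full; the proofs are below) =====
def Claim_equal_assign_sections : Prop := ∀ (names : List String), Dom_assign_sections names → Spec_assign_sections names (assign_sections names)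

-- ===== LEMMAS AND PROOFS =====

-- the canonical dict form both folds reach: keys u, value g k at key k
def pvDm (u : List String) (g : String → String) : PySem.Dict String String :=
  PySem.Dict.mk (u.map (fun k => (k, g k)))

theorem pvDm_congr (u : List String) (g g' : String → String)
    (h : ∀ k ∈ u, g k = g' k) : pvDm u g = pvDm u g' := by
  unfold pvDm
  congr 1
  exact List.map_congr_left (fun k hk => by rw [h k hk])

theorem pvKeys_Dm (u : List String) (g : String → String) : (pvDm u g).keys = u := by
  simp [pvDm, PySem.Dict.keys_mk, Function.comp_def]

theorem pvContains_Dm (u : List String) (g : String → String) (n : String) :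
    (pvDm u g).contains n = decide (n ∈ u) := by
  rw [PySem.Dict.contains_eq_decide_mem_keys, pvKeys_Dm]

theorem pvInsert_Dm_mem (u : List String) (g : String → String) (n : String) (v : String)
    (hn : n ∈ u) :
    (pvDm u g).insert n v = pvDm u (fun k => if k = n then v else g k) := by
  apply PySem.Dict.ext
  rw [PySem.Dict.items_insert_of_contains _ v (by rw [pvContains_Dm]; simpa)]
  show (List.map _ (u.map (fun k => (k, g k)))) = _
  unfold pvDm
  rw [List.map_map]
  apply List.map_congr_left
  intro k _
  by_cases hk : k = n <;> simp [hk]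

theorem pvInsert_Dm_not_mem (u : List String) (g : String → String) (n : String) (v : String)
    (hn : n ∉ u) :
    (pvDm u g).insert n v = pvDm (u ++ [n]) (fun k => if k = n then v else g k) := by
  apply PySem.Dict.ext
  rw [PySem.Dict.items_insert_of_not_contains _ v (by rw [pvContains_Dm]; simpa)]
  show (u.map (fun k => (k, g k))) ++ [(n, v)] = _
  unfold pvDm
  rw [List.map_append]
  simp only [List.map_cons, List.map_nil]
  congr 1
  apply List.map_congr_left
  intro k hk
  have : k ≠ n := fun h => hn (h ▸ hk)
  simp [this]

-- A's fold (value a pure function of the key) lands in pvDm with keys Set.update u names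
theorem pvFoldl_insert_fun (g : String → String) (names : List String) :
    ∀ (u : List String),
    names.foldl (fun d n => d.insert n (g n)) (pvDm u g)
      = pvDm (PySem.Set.update u names) g := by
  induction names with
  | nil => intro u; simp [PySem.Set.update]
  | cons n rest ih =>
      intro u
      have hstep : PySem.Set.update u (n :: rest) = PySem.Set.update (PySem.Set.add u n) rest := by
        simp [PySem.Set.update]
      rw [List.foldl_cons, hstep]
      by_cases hn : n ∈ u
      · rw [pvInsert_Dm_mem u g n (g n) hn,
          pvDm_congr u _ g (fun k _ => by by_cases hk : k = n <;> simp [hk]),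
          PySem.Set.add, if_pos (by simpa [PySem.Set.contains] using hn)]
        exact ih u
      · rw [pvInsert_Dm_not_mem u g n (g n) hn,
          pvDm_congr (u ++ [n]) _ g (fun k _ => by by_cases hk : k = n <;> simp [hk]),
          PySem.Set.add, if_neg (by simpa [PySem.Set.contains] using hn)]
        exact ih (u ++ [n])

-- B's inner loop over the keys: conditional overwrite with title t
theorem pvInner_loop (t : String) (m : String → Bool) (l : List String) :
    ∀ (u : List String) (f : String → String), (∀ n ∈ l, n ∈ u) →
    l.foldl (fun d n => if m n then d.insert n t else d) (pvDm u f)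
      = pvDm u (fun k => if k ∈ l ∧ m k = true then t else f k) := by
  induction l with
  | nil =>
      intro u f _
      simp only [List.foldl_nil]
      exact pvDm_congr u f _ (fun k _ => by simp)
  | cons n rest ih =>
      intro u f hsub
      have hnu : n ∈ u := hsub n (List.mem_cons_self ..)
      rw [List.foldl_cons]
      by_cases hm : m n = true
      · rw [if_pos hm, pvInsert_Dm_mem u f n t hnu,
          ih u _ (fun x hx => hsub x (List.mem_cons_of_mem _ hx))]
        apply pvDm_congr
        intro k _
        by_cases hk : k = n
        · subst hk; by_cases hr : k ∈ rest ∧ m k = true <;>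
            simp_all [List.mem_cons]
        · by_cases hr : k ∈ rest ∧ m k = true <;> simp_all [List.mem_cons]
      · rw [if_neg hm, ih u f (fun x hx => hsub x (List.mem_cons_of_mem _ hx))]
        apply pvDm_congr
        intro k _
        by_cases hk : k = n
        · subst hk; by_cases hr : k ∈ rest ∧ m k = true <;> simp_all [List.mem_cons]
        · by_cases hr : k ∈ rest ∧ m k = true <;> simp_all [List.mem_cons]

-- B's reverse sweep over the sections turns the all-"Other" dict into first-match values
theorem pvSweep (u : List String) :
    ∀ (secs : List (String × List String)),
    secs.reverse.foldl (fun assignment tp =>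
        assignment.keys.foldl (fun d name =>
          if tp.2.any (fun p => PySem.Str.startswith name p) then d.insert name tp.1 else d)
          assignment)
      (pvDm u (fun _ => "Other"))
      = pvDm u (fun k => pvFirstSection secs k) := by
  intro secs
  induction secs with
  | nil => exact pvDm_congr u _ _ (fun k _ => rfl)
  | cons tp rest ih =>
      obtain ⟨t, ps⟩ := tp
      rw [List.reverse_cons, List.foldl_append, ih, List.foldl_cons, List.foldl_nil,
        pvKeys_Dm, pvInner_loop t _ u u (fun k => pvFirstSection rest k) (fun n hn => hn)]
      apply pvDm_congr
      intro k hk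
      simp only [pvFirstSection]
      by_cases hm : ps.any (fun p => PySem.Str.startswith k p) = true
      · simp [hk]
      · simp [hk]


-- ===== VERDICT (by name: the statement is the Claim_ definition above) =====
theorem assign_sections_spec : Claim_equal_assign_sections := by
  intro names _
  unfold Spec_assign_sections assign_sections assign_sections_alt
  dsimp only
  have hA : (names.foldl (fun assignment name =>
        assignment.insert name (pvFirstSection pvSECTIONS name))
      (PySem.Dict.empty : PySem.Dict String String))
      = pvDm (PySem.Set.update [] names) (fun k => pvFirstSection pvSECTIONS k) :=
    pvFoldl_insert_fun _ names []
  have hB : (names.foldl (fun assignment name => assignment.insert name "Other")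
      (PySem.Dict.empty : PySem.Dict String String))
      = pvDm (PySem.Set.update [] names) (fun _ => "Other") :=
    pvFoldl_insert_fun _ names []
  rw [hA, hB, pvSweep (PySem.Set.update [] names) pvSECTIONS]
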